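-- pv_equiv track=rewrite | github.com/vinchinzu/euler | python/393.py | _valid_partial_horizontal_matching
-- ===== SOURCE A (Python) =====
-- from typing import Dict, Iterable, List, Tuple
--
-- def _valid_partial_horizontal_matching(
--
--     matching: Iterable[str],
--     col: int,  # Unused; kept to mirror original signature
-- ) -> bool:
--     positions: Dict[int, int] = {}
--
--     for c, move in enumerate(matching):
--         if move == "left":
--             target_col = c - 1
--         elif move == "right":
--             target_col = c + 1
--         else:
--             target_col = c
--
--         prev = positions.get(target_col)
--         if prev is not None and prev != c:
--             return False
--         positions[target_col] = c
--
--     return True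
-- ===== SOURCE B (Python) =====
-- def _valid_partial_horizontal_matching(matching, col):
--     # Sort the target columns, then a collision is exactly an equal ADJACENT pair.
--     targets = sorted(
--         c - 1 if move == "left" else c + 1 if move == "right" else c
--         for c, move in enumerate(matching)
--     )
--     for x, y in zip(targets, targets[1:]):
--         if x == y:
--             return False
--     return True
-- ===== Notes on version B (the rewrite author's own statement) =====
-- stated objective: alternative
-- what changed: B sorts the list of target columns and detects a collision as an equal adjacent pair in the sorted order, replacing A's incremental dict of seen positions with an early return inside the iteration.
import Mathlib
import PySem

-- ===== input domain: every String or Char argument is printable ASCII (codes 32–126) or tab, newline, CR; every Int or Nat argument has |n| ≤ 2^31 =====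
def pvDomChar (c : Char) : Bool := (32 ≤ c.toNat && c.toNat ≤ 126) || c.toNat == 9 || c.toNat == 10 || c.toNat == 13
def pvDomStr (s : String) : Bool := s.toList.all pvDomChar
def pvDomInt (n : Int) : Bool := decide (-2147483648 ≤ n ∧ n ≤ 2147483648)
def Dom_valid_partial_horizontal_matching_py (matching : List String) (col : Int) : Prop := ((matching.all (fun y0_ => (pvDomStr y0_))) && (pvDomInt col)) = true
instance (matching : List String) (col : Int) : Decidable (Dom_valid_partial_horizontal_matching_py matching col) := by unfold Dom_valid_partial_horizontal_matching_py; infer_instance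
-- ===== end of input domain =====

-- B sorts the target columns and reports a collision as an equal adjacent pair in the
-- sorted order, instead of A's incremental dict with an early return (objective: alternative).


-- ===== PORT A =====
-- the loop body's target column (the Python conditional)
def pvTargetOf (c : Int) (move : String) : Int :=
  if move == "left" then c - 1 else if move == "right" then c + 1 else c

-- the 'for c, move in enumerate(matching)' loop with early return, carrying positions
def pvGoA : List String → Int → PySem.Dict Int Int → Bool
  | [], _, _ => true
  | move :: rest, c, positions =>
    let target_col := pvTargetOf c move
    let prev := positions.get? target_col
    if prev.isSome && prev != some c then false
    else pvGoA rest (c + 1) (positions.insert target_col c)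

def valid_partial_horizontal_matching_py (matching : List String) (_col : Int) : Bool :=
  pvGoA matching 0 PySem.Dict.empty

-- ===== PORT B =====
-- the 'for x, y in zip(targets, targets[1:])' scan with early return
def pvAdjDistinct : List Int → Bool
  | x :: y :: rest => if x == y then false else pvAdjDistinct (y :: rest)
  | _ => true

def valid_partial_horizontal_matching_py_alt (matching : List String) (_col : Int) : Bool :=
  let targets := PySem.List.sorted
    ((PySem.List.enumerate matching).map (fun p =>
      if p.2 == "left" then p.1 - 1 else if p.2 == "right" then p.1 + 1 else p.1))
    (fun x => x) false
  pvAdjDistinct targets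

-- ===== PRECONDITION & SPEC =====
def Spec_valid_partial_horizontal_matching_py (matching : List String) (col : Int) (out : Bool) : Prop := out = valid_partial_horizontal_matching_py_alt matching col
instance (matching : List String) (col : Int) (out : Bool) : Decidable (Spec_valid_partial_horizontal_matching_py matching col out) := by unfold Spec_valid_partial_horizontal_matching_py; infer_instance

-- ===== CLAIM (what is proved, stated in full; the proofs are below) =====
def Claim_equal_valid_partial_horizontal_matching_py : Prop := ∀ (matching : List String) (col : Int), Dom_valid_partial_horizontal_matching_py matching col → Spec_valid_partial_horizontal_matching_py matching col (valid_partial_horizontal_matching_py matching col)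

-- ===== LEMMAS AND PROOFS =====

-- the list of target columns, structurally (proof-side view of both programs)
def pvTgts : List String → Int → List Int
  | [], _ => []
  | m :: rest, c => pvTargetOf c m :: pvTgts rest (c + 1)

theorem pvTgts_eq_enumerate_map (m : List String) (s : Int) :
    (PySem.List.enumerate m s).map (fun p =>
      if p.2 == "left" then p.1 - 1 else if p.2 == "right" then p.1 + 1 else p.1)
      = pvTgts m s := by
  induction m generalizing s with
  | nil => simp [PySem.List.enumerate_nil, pvTgts]
  | cons x xs ih =>
    rw [PySem.List.enumerate_cons, List.map_cons, ih]
    simp [pvTgts, pvTargetOf]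

theorem pvGoA_true_iff (m : List String) (c : Int) (pos : PySem.Dict Int Int)
    (hv : ∀ p ∈ pos.items, p.2 < c) :
    pvGoA m c pos = true ↔
      (pvTgts m c).Nodup ∧ ∀ t ∈ pvTgts m c, pos.contains t = false := by
  induction m generalizing c pos with
  | nil => simp [pvGoA, pvTgts]
  | cons mv rest ih =>
    simp only [pvGoA, pvTgts]
    cases hget : pos.get? (pvTargetOf c mv) with
    | some v =>
      have hvlt : v < c := hv _ (PySem.Dict.mem_items_of_get?_eq_some pos hget)
      have hvne : v ≠ c := ne_of_lt hvlt
      have hcon : pos.contains (pvTargetOf c mv) = true := by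
        rw [PySem.Dict.contains_eq_isSome_get?, hget]; rfl
      simp [hvne, hcon]
    | none =>
      have hcon : pos.contains (pvTargetOf c mv) = false := by
        rw [PySem.Dict.contains_eq_isSome_get?, hget]; rfl
      have hv' : ∀ p ∈ (pos.insert (pvTargetOf c mv) c).items, p.2 < c + 1 := by
        intro p hp
        rw [PySem.Dict.mem_items_insert] at hp
        rcases hp with h | ⟨h, _⟩
        · subst h; omega
        · exact lt_trans (hv _ h) (by omega)
      rw [if_neg (by simp), ih (c + 1) _ hv', List.nodup_cons]
      constructor
      · rintro ⟨hnd, hall⟩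
        refine ⟨⟨fun hmem => ?_, hnd⟩, ?_⟩
        · have := hall _ hmem
          rw [PySem.Dict.contains_insert] at this
          simp at this
        · intro t ht
          rcases List.mem_cons.mp ht with rfl | ht'
          · exact hcon
          · have := hall _ ht'
            rw [PySem.Dict.contains_insert] at this
            simp at this
            exact this.2
      · rintro ⟨hnd, hall⟩
        refine ⟨hnd.2, ?_⟩
        intro t ht
        rw [PySem.Dict.contains_insert]
        have hne : t ≠ pvTargetOf c mv := fun h => hnd.1 (h ▸ ht)
        simp [hne, hall _ (List.mem_cons_of_mem _ ht)]

-- on a ≤-pairwise list, no-equal-adjacent-pair is exactly Nodup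
theorem pvAdjDistinct_iff_nodup (l : List Int) (hs : l.Pairwise (· ≤ ·)) :
    pvAdjDistinct l = true ↔ l.Nodup := by
  induction l with
  | nil => simp [pvAdjDistinct]
  | cons x t ih =>
    cases t with
    | nil => simp [pvAdjDistinct]
    | cons y r =>
      rcases List.pairwise_cons.mp hs with ⟨hxall, hs'⟩
      by_cases hxy : x = y
      · subst hxy
        simp [pvAdjDistinct, List.nodup_cons]
      · have hlt : x < y := lt_of_le_of_ne (hxall y (by simp)) hxy
        have hxr : ∀ z ∈ r, x ≠ z := by
          intro z hz
          have hyz : y ≤ z := (List.pairwise_cons.mp hs').1 z hz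
          omega
        simp only [pvAdjDistinct]
        rw [if_neg (by simpa using hxy), ih hs']
        simp only [List.nodup_cons]
        constructor
        · rintro ⟨hy, hr⟩
          refine ⟨?_, hy, hr⟩
          simp only [List.mem_cons, not_or]
          exact ⟨hxy, fun hz => hxr x hz rfl⟩
        · rintro ⟨_, hy, hr⟩
          exact ⟨hy, hr⟩

-- ===== VERDICT (by name: the statement is the Claim_ definition above) =====
theorem valid_partial_horizontal_matching_py_spec : Claim_equal_valid_partial_horizontal_matching_py := by
  intro matching col _
  show valid_partial_horizontal_matching_py matching col
      = valid_partial_horizontal_matching_py_alt matching col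
  rw [Bool.eq_iff_iff]
  unfold valid_partial_horizontal_matching_py valid_partial_horizontal_matching_py_alt
  rw [pvGoA_true_iff matching 0 PySem.Dict.empty (by simp [PySem.Dict.empty])]
  rw [pvTgts_eq_enumerate_map]
  have hpw := PySem.List.sorted_pairwise (pvTgts matching 0) (fun x => x)
  rw [pvAdjDistinct_iff_nodup _ hpw]
  rw [(PySem.List.sorted_perm (pvTgts matching 0) (fun x => x) false).nodup_iff]
  simp [PySem.Dict.contains_empty]
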